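-- pv_equiv track=rewrite | github.com/whosayn/wordleguesser | frontend/views.py | _process_letter_counts
-- ===== SOURCE A (Python) =====
-- def _process_letter_counts(words, correct_position_letters, wrong_position_letters):
--     result = words
--     freq_dict = {}
--
--     for char in correct_position_letters + wrong_position_letters:
--         if char.isalpha():
--             freq_dict[char] = freq_dict.get(char, 0) + 1
--
--     for char, count in freq_dict.items():
--         current_words = []
--         for word in result:
--             if word.count(char) == count:
--                 current_words.append(word)
--         result = current_words
--
--     return result
-- ===== SOURCE B (Python) =====
-- def _process_letter_counts(words, correct_position_letters, wrong_position_letters):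
--     letters = [c for c in correct_position_letters + wrong_position_letters if c.isalpha()]
--     required = []
--     for c in sorted(letters):
--         if required and required[-1][0] == c:
--             required[-1] = (c, required[-1][1] + 1)
--         else:
--             required.append((c, 1))
--     return [w for w in words if all(w.count(c) == n for c, n in required)]
-- ===== Notes on version B (the rewrite author's own statement) =====
-- stated objective: alternative
-- what changed: Replaces A's accumulating frequency dict and its one-full-filtering-pass-per-distinct-letter cascade with sort + run-length encoding of the alpha letters followed by a single conjunctive pass over the words.
import Mathlib
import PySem

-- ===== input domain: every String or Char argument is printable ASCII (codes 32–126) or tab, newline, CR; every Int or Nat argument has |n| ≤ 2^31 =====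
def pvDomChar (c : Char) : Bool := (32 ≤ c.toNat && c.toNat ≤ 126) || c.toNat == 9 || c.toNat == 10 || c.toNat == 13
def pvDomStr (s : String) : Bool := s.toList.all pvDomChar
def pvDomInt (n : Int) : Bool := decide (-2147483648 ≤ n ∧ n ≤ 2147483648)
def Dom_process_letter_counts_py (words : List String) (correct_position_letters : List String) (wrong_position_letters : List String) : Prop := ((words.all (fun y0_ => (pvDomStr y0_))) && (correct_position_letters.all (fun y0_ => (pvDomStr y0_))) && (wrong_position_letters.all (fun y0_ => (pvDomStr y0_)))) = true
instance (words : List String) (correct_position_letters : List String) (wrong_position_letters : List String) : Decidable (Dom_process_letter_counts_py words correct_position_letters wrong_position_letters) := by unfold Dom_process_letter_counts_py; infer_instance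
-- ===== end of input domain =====

-- B replaces A's accumulating frequency dict and per-letter filtering passes with sort + run-length encoding of the alpha letters and one conjunctive pass over the words (same result).

-- ===== PORT A =====
def process_letter_counts_py (words : List String) (correct_position_letters : List String) (wrong_position_letters : List String) : List String :=
  let freq_dict : PySem.Dict String Int :=
    (correct_position_letters ++ wrong_position_letters).foldl
      (fun d ch => if PySem.Str.strIsalpha ch then d.insert ch (d.getD ch 0 + 1) else d)
      PySem.Dict.empty
  freq_dict.items.foldl
    (fun result cv =>
      result.foldl (fun current_words word =>
        if (PySem.Str.count word cv.1 : Int) == cv.2 then current_words ++ [word] else current_words) [])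
    words

-- ===== PORT B =====
-- 'required[-1] = (c, required[-1][1] + 1)' is ported exactly as dropLast ++ [updated last].
def pvRleStep (req : List (String × Int)) (c : String) : List (String × Int) :=
  match req.getLast? with
  | some last => if last.1 == c then req.dropLast ++ [(c, last.2 + 1)] else req ++ [(c, 1)]
  | none => req ++ [(c, 1)]

def process_letter_counts_py_alt (words : List String) (correct_position_letters : List String) (wrong_position_letters : List String) : List String :=
  let letters := (correct_position_letters ++ wrong_position_letters).filter (fun c => PySem.Str.strIsalpha c)
  let required := (PySem.List.sorted letters (fun x => x) false).foldl pvRleStep []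
  words.filter (fun w => required.all (fun cn => (PySem.Str.count w cn.1 : Int) == cn.2))

-- ===== PRECONDITION & SPEC =====
def Spec_process_letter_counts_py (words : List String) (correct_position_letters : List String) (wrong_position_letters : List String) (out : List String) : Prop := out = process_letter_counts_py_alt words correct_position_letters wrong_position_letters
instance (words : List String) (correct_position_letters : List String) (wrong_position_letters : List String) (out : List String) : Decidable (Spec_process_letter_counts_py words correct_position_letters wrong_position_letters out) := by unfold Spec_process_letter_counts_py; infer_instance

-- ===== CLAIM (what is proved, stated in full; the proofs are below) =====
def Claim_equal_process_letter_counts_py : Prop := ∀ (words : List String) (correct_position_letters : List String) (wrong_position_letters : List String), Dom_process_letter_counts_py words correct_position_letters wrong_position_letters → Spec_process_letter_counts_py words correct_position_letters wrong_position_letters (process_letter_counts_py words correct_position_letters wrong_position_letters)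

-- ===== LEMMAS AND PROOFS =====

-- Structural run-length encoding (proof-side characterisation of B's fold).
def pvRuns : List String → List (String × Int)
  | [] => []
  | c :: t => (c, 1 + ((t.takeWhile (· == c)).length : Int)) :: pvRuns (t.dropWhile (· == c))
termination_by l => l.length
decreasing_by
  simp only [List.length_cons]
  exact Nat.lt_succ_of_le (t.length_dropWhile_le _)

theorem pv_bool_ext (a b : Bool) (h : a = true ↔ b = true) : a = b := by
  cases a <;> cases b <;> simp_all

theorem pv_foldl_rle (t : List String) : ∀ (acc : List (String × Int)) (c : String) (n : Int),
    t.foldl pvRleStep (acc ++ [(c, n)])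
    = acc ++ (c, n + ((t.takeWhile (· == c)).length : Int)) :: pvRuns (t.dropWhile (· == c)) := by
  induction t with
  | nil => intro acc c n; simp [pvRuns]
  | cons h t ih =>
      intro acc c n
      by_cases hc : h = c
      · subst hc
        have hstep : pvRleStep (acc ++ [(h, n)]) h = acc ++ [(h, n + 1)] := by
          simp [pvRleStep]
        rw [List.foldl_cons, hstep, ih acc h (n + 1)]
        simp only [List.takeWhile_cons, List.dropWhile_cons, BEq.rfl]
        have harith : n + 1 + ((t.takeWhile (· == h)).length : Int)
            = n + (((h :: t.takeWhile (· == h)).length : Nat) : Int) := by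
          push_cast [List.length_cons]; ring
        rw [harith]
        simp
      · have hcb : (c == h) = false := by
          simp only [beq_eq_false_iff_ne, ne_eq]
          exact fun he => hc he.symm
        have hbc : (h == c) = false := by
          simp only [beq_eq_false_iff_ne, ne_eq]; exact hc
        have hstep : pvRleStep (acc ++ [(c, n)]) h = (acc ++ [(c, n)]) ++ [(h, 1)] := by
          simp [pvRleStep, hcb]
        rw [List.foldl_cons, hstep, ih (acc ++ [(c, n)]) h 1]
        simp [hbc, pvRuns]

theorem pv_foldl_eq_runs (l : List String) : l.foldl pvRleStep [] = pvRuns l := by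
  cases l with
  | nil => simp [pvRuns]
  | cons c t =>
      have h0 : pvRleStep [] c = [(c, 1)] := by simp [pvRleStep]
      have := pv_foldl_rle t [] c 1
      simp only [List.foldl_cons, h0, List.nil_append] at this ⊢
      rw [this, pvRuns]

theorem pv_runs_keys (l : List String) (c : String) :
    (∃ n, (c, n) ∈ pvRuns l) ↔ c ∈ l := by
  induction l using pvRuns.induct with
  | case1 => simp [pvRuns]
  | case2 h t ih =>
      rw [pvRuns]
      constructor
      · rintro ⟨n, hn⟩
        rcases List.mem_cons.mp hn with he | hm
        · simp only [Prod.mk.injEq] at he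
          simp [he.1]
        · have hc : c ∈ t.dropWhile (· == h) := (ih.mp ⟨n, hm⟩)
          exact List.mem_cons_of_mem _ ((t.dropWhile_sublist _).mem hc)
      · intro hc
        by_cases hch : c = h
        · subst hch
          exact ⟨_, List.mem_cons_self ..⟩
        · rcases List.mem_cons.mp hc with he | hm
          · exact absurd he hch
          · have : c ∈ t.takeWhile (· == h) ∨ c ∈ t.dropWhile (· == h) := by
              rw [← List.mem_append, List.takeWhile_append_dropWhile]; exact hm
            rcases this with hT | hD
            · exact absurd (by simpa using List.mem_takeWhile_imp hT) hch
            · obtain ⟨n, hn⟩ := ih.mpr hD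
              exact ⟨n, List.mem_cons_of_mem _ hn⟩

-- On a ≤-sorted list every run records the total count of its letter.
theorem pv_runs_count (l : List String) (hs : l.Pairwise (· ≤ ·)) :
    ∀ c n, (c, n) ∈ pvRuns l → n = (l.count c : Int) := by
  induction l using pvRuns.induct with
  | case1 => simp [pvRuns]
  | case2 h t ih =>
      have hsplit : t = t.takeWhile (· == h) ++ t.dropWhile (· == h) :=
        (t.takeWhile_append_dropWhile (p := (· == h))).symm
      have hle : ∀ x ∈ t, h ≤ x := (List.pairwise_cons.mp hs).1
      have hst : t.Pairwise (· ≤ ·) := (List.pairwise_cons.mp hs).2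
      have hsD : (t.dropWhile (· == h)).Pairwise (· ≤ ·) :=
        hst.sublist (t.dropWhile_sublist _)
      -- h does not occur in the dropWhile part
      have hnotin : h ∉ t.dropWhile (· == h) := by
        intro hmem
        cases hD : t.dropWhile (· == h) with
        | nil => simp [hD] at hmem
        | cons d r =>
            have hdne : d ≠ h := by
              have hne : t.dropWhile (· == h) ≠ [] := by simp [hD]
              have := List.head_dropWhile_not (· == h) hne
              simp only [hD, List.head_cons] at this
              simpa using this
            rw [hD] at hmem
            rcases List.mem_cons.mp hmem with he | hr
            · exact hdne he.symm
            · have hdle : d ≤ h := by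
                have hp := hsD
                rw [hD] at hp
                exact (List.pairwise_cons.mp hp).1 h hr
              have hhd : h ≤ d := hle d (by
                rw [hsplit]
                exact List.mem_append_right _ (by simp [hD]))
              exact hdne (le_antisymm hdle hhd)
      have hcntT : (t.takeWhile (· == h)).count h = (t.takeWhile (· == h)).length :=
        List.count_eq_length.mpr (fun b hb => by
          have hb' := List.mem_takeWhile_imp hb
          simp only [beq_iff_eq] at hb'
          exact hb'.symm)
      have hcntD : (t.dropWhile (· == h)).count h = 0 :=
        List.count_eq_zero.mpr hnotin
      have hct : t.count h = (t.takeWhile (· == h)).length := by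
        conv_lhs => rw [hsplit]
        rw [List.count_append, hcntT, hcntD]
        omega
      intro c n hmem
      rw [pvRuns] at hmem
      rcases List.mem_cons.mp hmem with he | hm
      · rw [Prod.mk.injEq] at he
        obtain ⟨hc, hn⟩ := he
        subst hc
        rw [hn, List.count_cons_self, hct]
        push_cast
        ring
      · have hcmem : c ∈ t.dropWhile (· == h) := (pv_runs_keys _ c).mp ⟨n, hm⟩
        have hch : c ≠ h := fun he => hnotin (he ▸ hcmem)
        have hcntT0 : (t.takeWhile (· == h)).count c = 0 :=
          List.count_eq_zero.mpr (fun hmT =>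
            hch (by simpa using List.mem_takeWhile_imp hmT))
        have hct2 : t.count c = (t.dropWhile (· == h)).count c := by
          conv_lhs => rw [hsplit]
          rw [List.count_append, hcntT0]
          omega
        rw [ih hsD c n hm, List.count_cons_of_ne (Ne.symm hch), hct2]

-- B's per-word test over the runs = "every letter's count matches", as a Prop.
theorem pv_runs_all (l : List String) (hs : l.Pairwise (· ≤ ·)) (w : String) :
    (pvRuns l).all (fun cn => (PySem.Str.count w cn.1 : Int) == cn.2)
    = decide (∀ c ∈ l, (PySem.Str.count w c : Int) = (l.count c : Int)) := by
  apply pv_bool_ext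
  rw [List.all_eq_true, decide_eq_true_iff]
  constructor
  · intro hall c hc
    obtain ⟨n, hn⟩ := (pv_runs_keys l c).mpr hc
    have := hall _ hn
    simp only [beq_iff_eq] at this
    rw [this, pv_runs_count l hs c n hn]
  · rintro hall ⟨c, n⟩ hmem
    simp only [beq_iff_eq]
    rw [pv_runs_count l hs c n hmem]
    exact hall c ((pv_runs_keys l c).mp ⟨n, hmem⟩)

-- A's inner append-loop is a filter.
theorem pv_inner_filter (p : String → Bool) (r : List String) :
    r.foldl (fun cur w => if p w then cur ++ [w] else cur) [] = r.filter p := by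
  simpa using PySem.List.foldl_append_if_eq_filter p r []

-- Sequential filtering passes over the items equal one conjunctive filter.
theorem pv_passes_eq_filter (p : String → String × Int → Bool) :
    ∀ (items : List (String × Int)) (ws : List String),
      items.foldl (fun result cv =>
        result.foldl (fun cur w => if p w cv then cur ++ [w] else cur) []) ws
      = ws.filter (fun w => items.all (p w)) := by
  intro items
  induction items with
  | nil => intro ws; simp
  | cons cv rest ih =>
      intro ws
      simp only [List.foldl_cons, pv_inner_filter (fun w => p w cv) ws, ih,
        List.filter_filter, List.all_cons]
      exact List.filter_congr (by intro w _; simp [Bool.and_comm])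

-- A's dict build is the counter of the alpha-filtered letter list.
theorem pv_dict_eq_counter (chars : List String) :
    chars.foldl
      (fun d ch => if PySem.Str.strIsalpha ch then d.insert ch (d.getD ch 0 + 1) else d)
      PySem.Dict.empty
    = PySem.Dict.counter (chars.filter (fun c => PySem.Str.strIsalpha c)) := by
  rw [PySem.List.foldl_if_eq_foldl_filter,
    PySem.Dict.foldl_insert_getD_add_one_eq_counter]

-- A's per-word test over the counter items, as the same Prop.
theorem pv_items_all (letters : List String) (w : String) :
    (PySem.Dict.counter letters).items.all
      (fun cv => (PySem.Str.count w cv.1 : Int) == cv.2)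
    = decide (∀ c ∈ letters, (PySem.Str.count w c : Int) = (letters.count c : Int)) := by
  apply pv_bool_ext
  rw [PySem.Dict.items_counter, List.all_map, List.all_eq_true, decide_eq_true_iff]
  simp only [Function.comp_def, beq_iff_eq]
  constructor
  · intro hall c hc
    exact hall c ((PySem.Set.mem_ofList letters c).mpr hc)
  · intro hall c hc
    exact hall c ((PySem.Set.mem_ofList letters c).mp hc)

-- ===== VERDICT (by name: the statement is the Claim_ definition above) =====
theorem process_letter_counts_py_spec : Claim_equal_process_letter_counts_py := by
  intro words cpl wpl _
  unfold Spec_process_letter_counts_py process_letter_counts_py process_letter_counts_py_alt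
  simp only [pv_dict_eq_counter, pv_passes_eq_filter, pv_foldl_eq_runs]
  set letters := (cpl ++ wpl).filter (fun c => PySem.Str.strIsalpha c) with hL
  have hperm : (PySem.List.sorted letters (fun x => x) false).Perm letters :=
    PySem.List.sorted_perm letters (fun x => x) false
  have hs : (PySem.List.sorted letters (fun x => x) false).Pairwise (· ≤ ·) := by
    simpa using PySem.List.sorted_pairwise letters (fun x => x)
  apply List.filter_congr
  intro w _
  rw [pv_items_all, pv_runs_all _ hs w]
  apply pv_bool_ext
  rw [decide_eq_true_iff, decide_eq_true_iff]
  constructor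
  · intro hall c hc
    rw [hperm.count_eq]
    exact hall c (hperm.mem_iff.mp hc)
  · intro hall c hc
    rw [← hperm.count_eq]
    exact hall c (hperm.mem_iff.mpr hc)
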